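-- pv_equiv track=rewrite | github.com/n-thnptp/ku82-cs-cpe-lab | Lab13 Methods/01_2.py | create_factors_3_7
-- ===== SOURCE A (Python) =====
-- def create_factors_3_7(n):
--     ls = []
--
--     count = 0
--     i = 3
--     while len(ls) < n:
--         if i % 3 == 0 or i % 7 == 0:
--             ls.append(i)
--         i += 1
--         count += 1
--     return ls
-- ===== SOURCE B (Python) =====
-- def create_factors_3_7(n):
--     # merge the two arithmetic progressions 3,6,9,... and 7,14,21,...
--     ls = []
--     a, b = 3, 7
--     while len(ls) < n:
--         if a < b:
--             ls.append(a)
--             a += 3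
--         elif b < a:
--             ls.append(b)
--             b += 7
--         else:
--             ls.append(a)
--             a += 3
--             b += 7
--     return ls
-- ===== Notes on version B (the rewrite author's own statement) =====
-- stated objective: faster
-- what changed: Replaces the scan of every integer from 3 with divisibility tests by a two-pointer merge of the arithmetic progressions of multiples of 3 and of 7, emitting one result per loop iteration and appending multiples of 21 once.
import Mathlib
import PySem

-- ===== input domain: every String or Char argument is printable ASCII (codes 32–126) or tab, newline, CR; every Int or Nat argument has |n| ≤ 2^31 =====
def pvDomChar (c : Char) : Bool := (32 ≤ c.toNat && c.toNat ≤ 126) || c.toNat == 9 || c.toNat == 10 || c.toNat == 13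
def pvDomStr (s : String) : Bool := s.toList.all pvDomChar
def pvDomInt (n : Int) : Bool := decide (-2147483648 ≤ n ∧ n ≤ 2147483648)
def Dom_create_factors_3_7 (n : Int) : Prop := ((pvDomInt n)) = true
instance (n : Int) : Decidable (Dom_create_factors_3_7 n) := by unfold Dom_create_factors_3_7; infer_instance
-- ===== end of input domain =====

-- B replaces A's scan of every integer (with two modulo tests each) by a two-pointer
-- merge of the multiples of 3 and of 7; objective: faster (constant factor).

-- ===== PORT A =====
-- A's while loop: state (ls, i); 'count' is dead state and is kept as a variable.
-- Terminates because every third integer is a multiple of 3.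
def pvAloop (n : Int) (ls : List Int) (count : Int) (i : Int) : List Int :=
  if _h : (ls.length : Int) < n then
    if PySem.Int.mod i 3 = 0 ∨ PySem.Int.mod i 7 = 0 then
      pvAloop n (ls ++ [i]) (count + 1) (i + 1)
    else
      pvAloop n ls (count + 1) (i + 1)
  else ls
termination_by (3 * (n - ls.length) + (-i) % 3).toNat
decreasing_by
  · simp only [PySem.Int.mod, Int.fmod_eq_emod] at *
    simp at *
    omega
  · simp only [PySem.Int.mod, Int.fmod_eq_emod] at *
    simp at *
    omega

def create_factors_3_7 (n : Int) : List Int := pvAloop n [] 0 3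

-- ===== PORT B =====
-- B's while loop: state (ls, a, b); a, b are the next unemitted multiples of 3 and 7.
def pvBloop (n : Int) (ls : List Int) (a : Int) (b : Int) : List Int :=
  if _h : (ls.length : Int) < n then
    if a < b then pvBloop n (ls ++ [a]) (a + 3) b
    else if b < a then pvBloop n (ls ++ [b]) a (b + 7)
    else pvBloop n (ls ++ [a]) (a + 3) (b + 7)
  else ls
termination_by (n - ls.length).toNat
decreasing_by all_goals (simp at *; omega)

def create_factors_3_7_alt (n : Int) : List Int := pvBloop n [] 3 7

-- ===== PRECONDITION & SPEC =====
def Spec_create_factors_3_7 (n : Int) (out : List Int) : Prop := out = create_factors_3_7_alt n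
instance (n : Int) (out : List Int) : Decidable (Spec_create_factors_3_7 n out) := by unfold Spec_create_factors_3_7; infer_instance

-- ===== CLAIM (what is proved, stated in full; the proofs are below) =====
def Claim_equal_create_factors_3_7 : Prop := ∀ (n : Int), Dom_create_factors_3_7 n → Spec_create_factors_3_7 n (create_factors_3_7 n)

-- ===== LEMMAS AND PROOFS =====

theorem pymod3 (i : Int) : PySem.Int.mod i 3 = i % 3 := by
  simp only [PySem.Int.mod]; rw [Int.fmod_eq_emod]; simp

theorem pymod7 (i : Int) : PySem.Int.mod i 7 = i % 7 := by
  simp only [PySem.Int.mod]; rw [Int.fmod_eq_emod]; simp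

-- Joint invariant: a (resp. b) is the least multiple of 3 (resp. 7) that is ≥ i.
theorem loop_eq (μ : Nat) : ∀ (n : Int) (ls : List Int) (count i a b : Int),
    (3 * (n - ls.length) + (-i) % 3).toNat = μ →
    i ≤ a → i ≤ b → a % 3 = 0 → b % 7 = 0 →
    (∀ j, i ≤ j → j < a → ¬ j % 3 = 0) →
    (∀ j, i ≤ j → j < b → ¬ j % 7 = 0) →
    pvAloop n ls count i = pvBloop n ls a b := by
  induction μ using Nat.strong_induction_on with
  | _ μ ih =>
    intro n ls count i a b hμ hia hib ha3 hb7 hna hnb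
    by_cases hlen : (ls.length : Int) < n
    · rcases lt_or_eq_of_le hia with hlt3 | heq3
      · rcases lt_or_eq_of_le hib with hlt7 | heq7
        · -- i < a, i < b : i qualifies neither; A skips, B stays
          rw [pvAloop, dif_pos hlen,
              if_neg (by rw [pymod3, pymod7]; push Not;
                         exact ⟨hna i le_rfl hlt3, hnb i le_rfl hlt7⟩)]
          exact ih _ (by have := hna i le_rfl hlt3; omega) n ls (count+1) (i+1) a b rfl
            (by omega) (by omega) ha3 hb7
            (fun j h1 h2 => hna j (by omega) h2) (fun j h1 h2 => hnb j (by omega) h2)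
        · -- i < a, i = b : emit b, advance b
          subst heq7
          rw [pvAloop, dif_pos hlen, if_pos (by rw [pymod3, pymod7]; right; omega),
              pvBloop, dif_pos hlen, if_neg (by omega), if_pos (by omega)]
          exact ih _ (by have := hna i le_rfl hlt3; simp at hμ ⊢; omega) n (ls ++ [i])
            (count+1) (i+1) a (i+7) rfl (by omega) (by omega) ha3 (by omega)
            (fun j h1 h2 => hna j (by omega) h2)
            (fun j h1 h2 hj => by omega)
      · rcases lt_or_eq_of_le hib with hlt7 | heq7
        · -- i = a < b : emit a, advance a
          subst heq3
          rw [pvAloop, dif_pos hlen, if_pos (by rw [pymod3, pymod7]; left; omega),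
              pvBloop, dif_pos hlen, if_pos (by omega)]
          exact ih _ (by simp at hμ ⊢; omega) n (ls ++ [i])
            (count+1) (i+1) (i+3) b rfl (by omega) (by omega) (by omega) hb7
            (fun j h1 h2 hj => by omega)
            (fun j h1 h2 => hnb j (by omega) h2)
        · -- i = a = b : emit once, advance both
          subst heq3; subst heq7
          rw [pvAloop, dif_pos hlen, if_pos (by rw [pymod3, pymod7]; left; omega),
              pvBloop, dif_pos hlen, if_neg (by omega), if_neg (by omega)]
          exact ih _ (by simp at hμ ⊢; omega) n (ls ++ [i])
            (count+1) (i+1) (i+3) (i+7) rfl (by omega) (by omega) (by omega) (by omega)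
            (fun j h1 h2 hj => by omega)
            (fun j h1 h2 hj => by omega)
    · rw [pvAloop, dif_neg hlen, pvBloop, dif_neg hlen]

-- ===== VERDICT (by name: the statement is the Claim_ definition above) =====
theorem create_factors_3_7_spec : Claim_equal_create_factors_3_7 := by
  intro n _
  unfold Spec_create_factors_3_7 create_factors_3_7 create_factors_3_7_alt
  exact loop_eq _ n [] 0 3 3 7 rfl le_rfl (by omega) (by omega) (by omega)
    (fun j h1 h2 => by omega) (fun j h1 h2 => by omega)
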